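-- pv_equiv track=rewrite | github.com/tanwardivya/DSA | neetcode/string/remove_all_adjacent_duplicates_in_string_II.py | remove_all_adjacent_duplicates
-- ===== SOURCE A (Python) =====
-- def remove_all_adjacent_duplicates(s:str, k:int)-> str:
--     stack = [] # [char, count], this will create
--
--     for c in s:
--         if stack and stack[-1][0] == c:
--             stack[-1][1] += 1
--         else:
--             stack.append([c,1])
--
--         if stack[-1][1] == k:
--             stack.pop()
--
--     res = ""
--     for char, count in stack:
--         res += (char * count)
--     return res
-- ===== SOURCE B (Python) =====
-- def _collapse(s, k):
--     out = []
--     i = 0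
--     n = len(s)
--     while i < n:
--         j = i
--         while j < n and s[j] == s[i]:
--             j += 1
--         out.append(s[i] * ((j - i) % k))
--         i = j
--     return "".join(out)
--
--
-- def remove_all_adjacent_duplicates(s: str, k: int) -> str:
--     # Repeatedly collapse maximal runs modulo k until the string stabilizes.
--     while True:
--         t = _collapse(s, k)
--         if t == s:
--             return s
--         s = t
-- ===== Notes on version B (the rewrite author's own statement) =====
-- stated objective: alternative
-- what changed: Replaces the single-pass char/count stack with a fixpoint loop that repeatedly rewrites each maximal run of length m as m % k copies until no pass changes the string.
-- outside the precondition, e.g. on remove_all_adjacent_duplicates('aa', 0): A returns 'aa', B raises ZeroDivisionError; on remove_all_adjacent_duplicates('aaa', -2): A returns 'aaa', B returns ''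
import Mathlib
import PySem

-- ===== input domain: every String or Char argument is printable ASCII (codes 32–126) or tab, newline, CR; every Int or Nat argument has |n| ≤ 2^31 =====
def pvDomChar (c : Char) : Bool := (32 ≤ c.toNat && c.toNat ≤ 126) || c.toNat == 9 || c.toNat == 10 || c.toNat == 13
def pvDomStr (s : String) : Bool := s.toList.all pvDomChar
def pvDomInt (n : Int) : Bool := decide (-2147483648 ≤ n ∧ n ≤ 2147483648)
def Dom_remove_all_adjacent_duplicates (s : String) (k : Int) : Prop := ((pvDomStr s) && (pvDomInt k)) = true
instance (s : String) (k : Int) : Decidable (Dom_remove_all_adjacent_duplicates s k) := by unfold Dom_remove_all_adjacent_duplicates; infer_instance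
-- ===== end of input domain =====

-- B replaces A's single-pass char/count stack by repeatedly collapsing each maximal run of
-- length m to m % k copies until a pass changes nothing (objective: alternative decomposition).

-- ===== PORT A =====
-- A's stack of [char, count] pairs; held TOP-FIRST here (Python's stack[-1] is the head),
-- so the final rendering pass walks stack.reverse in Python's bottom-to-top order.
def pvStepA (k : Int) (stack : List (Char × Int)) (c : Char) : List (Char × Int) :=
  let stack :=
    match stack with
    | (c0, n) :: rest => if c0 = c then (c0, n + 1) :: rest else (c, 1) :: (c0, n) :: rest
    | [] => [(c, 1)]
  match stack with
  | (c0, n) :: rest => if n = k then rest else (c0, n) :: rest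
  | [] => []

def remove_all_adjacent_duplicates (s : String) (k : Int) : String :=
  String.mk ((s.toList.foldl (pvStepA k) []).reverse.foldl
    (fun res e => res ++ List.replicate e.2.toNat e.1) [])

-- ===== PORT B =====
-- one pass of Source B's _collapse: each maximal run of m equal chars becomes (m % k) copies
def pvCollapse (k : Int) : List Char → List Char
  | [] => []
  | c :: rest =>
    List.replicate (PySem.Int.mod ((rest.takeWhile (fun d => d = c)).length + 1) k).toNat c
      ++ pvCollapse k (rest.dropWhile (fun d => d = c))
termination_by l => l.length
decreasing_by
  simpa using Nat.lt_succ_of_le (List.length_dropWhile_le _ _)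

-- Source B's `while True` loop; fuel (length + 1) only makes the recursion total: inside
-- Pre_ each non-fixpoint pass strictly shortens the string, so the fuel is never exhausted
def pvFixloop (k : Int) : Nat → List Char → List Char
  | 0, l => l
  | fuel + 1, l =>
    let t := pvCollapse k l
    if t = l then l else pvFixloop k fuel t

def remove_all_adjacent_duplicates_alt (s : String) (k : Int) : String :=
  String.mk (pvFixloop k (s.toList.length + 1) s.toList)

-- ===== PRECONDITION & SPEC =====
-- Pre_ restricts k to the task's natural domain (a removal count, k ≥ 1): for k ≤ 0 the
-- Python A degenerately returns s unchanged while B's run arithmetic `m % k` raises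
-- ZeroDivisionError (k = 0) or empties the runs (k < 0).
def Pre_remove_all_adjacent_duplicates (s : String) (k : Int) : Prop := 0 < k
instance (s : String) (k : Int) : Decidable (Pre_remove_all_adjacent_duplicates s k) := by
  unfold Pre_remove_all_adjacent_duplicates; infer_instance

def pvWitness_remove_all_adjacent_duplicates : String × Int := ("aaabcb", 3)

def Spec_remove_all_adjacent_duplicates (s : String) (k : Int) (out : String) : Prop :=
  out = remove_all_adjacent_duplicates_alt s k
instance (s : String) (k : Int) (out : String) : Decidable (Spec_remove_all_adjacent_duplicates s k out) := by
  unfold Spec_remove_all_adjacent_duplicates; infer_instance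

-- ===== CLAIM (what is proved, stated in full; the proofs are below) =====
def Claim_equal_remove_all_adjacent_duplicates : Prop :=
  ∀ (s : String) (k : Int), Dom_remove_all_adjacent_duplicates s k →
    Pre_remove_all_adjacent_duplicates s k →
    Spec_remove_all_adjacent_duplicates s k (remove_all_adjacent_duplicates s k)

-- ===== LEMMAS AND PROOFS =====

-- the head of the stack (if any) does not carry char c
def pvHeadOk (st : List (Char × Int)) (c : Char) : Prop :=
  ∀ e ∈ st.head?, e.1 ≠ c

-- invariant of A's stack: counts lie in [1, k) and adjacent entries carry distinct chars
def pvInv (k : Int) : List (Char × Int) → Prop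
  | [] => True
  | (c, n) :: rest => 1 ≤ n ∧ n < k ∧ pvHeadOk rest c ∧ pvInv k rest

def pvRender (st : List (Char × Int)) : List Char :=
  st.reverse.foldl (fun res e => res ++ List.replicate e.2.toNat e.1) []

lemma stepA_match (k : Int) (c : Char) (n : Int) (rest : List (Char × Int)) :
    pvStepA k ((c, n) :: rest) c = if n + 1 = k then rest else (c, n + 1) :: rest := by
  simp [pvStepA]

lemma stepA_headOk (k : Int) (c : Char) (st : List (Char × Int)) (h : pvHeadOk st c) :
    pvStepA k st c = if (1 : Int) = k then st else (c, 1) :: st := by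
  cases st with
  | nil => simp [pvStepA]
  | cons e rest =>
    obtain ⟨c0, n⟩ := e
    have hne : c0 ≠ c := h (c0, n) rfl
    simp [pvStepA, hne]

lemma render_cons (c : Char) (n : Int) (st : List (Char × Int)) :
    pvRender ((c, n) :: st) = pvRender st ++ List.replicate n.toNat c := by
  simp [pvRender, List.foldl_append]

lemma L_inc (k : Int) (c : Char) :
    ∀ (j : Nat) (n : Int) (rest : List (Char × Int)), n + j < k →
      List.foldl (pvStepA k) ((c, n) :: rest) (List.replicate j c) = (c, n + j) :: rest := by
  intro j
  induction j with
  | zero => intro n rest _; simp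
  | succ j ih =>
    intro n rest h
    have hlt : n + 1 + j < k := by push_cast at h ⊢; omega
    have hne : ¬ (n + 1 = k) := by push_cast at h; omega
    rw [List.replicate_succ, List.foldl_cons, stepA_match, if_neg hne, ih (n + 1) rest hlt]
    congr 2
    push_cast; ring

lemma L_fill (k : Int) (c : Char) :
    ∀ (j : Nat) (n : Int) (rest : List (Char × Int)), n + j + 1 = k →
      List.foldl (pvStepA k) ((c, n) :: rest) (List.replicate (j + 1) c) = rest := by
  intro j
  induction j with
  | zero =>
    intro n rest h
    have hnk : n + 1 = k := by push_cast at h; omega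
    simp [stepA_match, hnk]
  | succ j ih =>
    intro n rest h
    have hne : ¬ (n + 1 = k) := by push_cast at h; omega
    rw [List.replicate_succ, List.foldl_cons, stepA_match, if_neg hne]
    apply ih
    push_cast at h ⊢; omega

lemma L_push (k : Int) (c : Char) (j : Nat) (st : List (Char × Int))
    (hok : pvHeadOk st c) (h1 : 1 ≤ j) (hk : (j : Int) < k) :
    List.foldl (pvStepA k) st (List.replicate j c) = (c, (j : Int)) :: st := by
  obtain ⟨j', rfl⟩ : ∃ j', j = j' + 1 := ⟨j - 1, by omega⟩
  have hne : ¬ ((1 : Int) = k) := by push_cast at hk; omega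
  rw [List.replicate_succ, List.foldl_cons, stepA_headOk k c st hok, if_neg hne]
  rw [L_inc k c j' 1 st (by push_cast at hk ⊢; omega)]
  congr 2
  push_cast; ring

lemma run_k_headOk (k : Int) (c : Char) (st : List (Char × Int))
    (hok : pvHeadOk st c) (hk : 0 < k) :
    List.foldl (pvStepA k) st (List.replicate k.toNat c) = st := by
  by_cases h1 : k = 1
  · subst h1
    simp [stepA_headOk 1 c st hok]
  · have hk2 : 2 ≤ k := by omega
    have hsplit : k.toNat = (k.toNat - 2) + 1 + 1 := by omega
    rw [hsplit, List.replicate_succ, List.foldl_cons, stepA_headOk k c st hok,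
      if_neg (by omega)]
    apply L_fill
    push_cast
    omega

lemma run_k (k : Int) (c : Char) (st : List (Char × Int))
    (hinv : pvInv k st) (hk : 0 < k) :
    List.foldl (pvStepA k) st (List.replicate k.toNat c) = st := by
  cases st with
  | nil => exact run_k_headOk k c [] (by simp [pvHeadOk]) hk
  | cons e rest =>
    obtain ⟨c0, n⟩ := e
    obtain ⟨hn1, hnk, hok, hrest⟩ := hinv
    by_cases hc : c0 = c
    · subst hc
      have hsplit : k.toNat = ((k - n).toNat - 1) + 1 + n.toNat := by omega
      rw [hsplit, List.replicate_add, List.foldl_append]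
      rw [L_fill k c0 ((k - n).toNat - 1) n rest (by push_cast; omega)]
      rw [L_push k c0 n.toNat rest hok (by omega) (by omega)]
      congr 2
      omega
    · refine run_k_headOk k c ((c0, n) :: rest) ?_ hk
      intro e he
      simp only [List.head?_cons, Option.mem_def, Option.some.injEq] at he
      rw [← he]
      exact hc

lemma inv_step (k : Int) (st : List (Char × Int)) (c : Char)
    (hk : 0 < k) (hinv : pvInv k st) : pvInv k (pvStepA k st c) := by
  cases st with
  | nil =>
    by_cases h1 : (1 : Int) = k
    · simp [pvStepA, ← h1, pvInv]
    · simp only [pvStepA, h1, if_false]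
      exact ⟨le_refl 1, by omega, by intro e he; simp at he, trivial⟩
  | cons e rest =>
    obtain ⟨c0, n⟩ := e
    obtain ⟨hn1, hnk, hok, hrest⟩ := hinv
    by_cases hc : c0 = c
    · subst hc
      rw [stepA_match]
      by_cases hnk1 : n + 1 = k
      · rw [if_pos hnk1]; exact hrest
      · rw [if_neg hnk1]
        exact ⟨by omega, by omega, hok, hrest⟩
    · have hok' : pvHeadOk ((c0, n) :: rest) c := by
        intro e he
        simp only [List.head?_cons, Option.mem_def, Option.some.injEq] at he
        rw [← he]
        exact hc
      rw [stepA_headOk k c _ hok']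
      by_cases h1 : (1 : Int) = k
      · rw [if_pos h1]; exact ⟨hn1, hnk, hok, hrest⟩
      · rw [if_neg h1]
        exact ⟨le_refl 1, by omega, hok', hn1, hnk, hok, hrest⟩

lemma inv_foldl (k : Int) (hk : 0 < k) :
    ∀ (l : List Char) (st : List (Char × Int)), pvInv k st →
      pvInv k (List.foldl (pvStepA k) st l) := by
  intro l
  induction l with
  | nil => intro st h; exact h
  | cons c rest ih => intro st h; exact ih _ (inv_step k st c hk h)

lemma mod_lemma (k : Int) (c : Char) (hk : 0 < k) :
    ∀ (m : Nat) (st : List (Char × Int)), pvInv k st →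
      List.foldl (pvStepA k) st (List.replicate m c) =
        List.foldl (pvStepA k) st (List.replicate (PySem.Int.mod (m : Int) k).toNat c) := by
  intro m
  induction m using Nat.strong_induction_on with
  | _ m ih =>
    intro st hinv
    by_cases hlt : (m : Int) < k
    · have hmm : PySem.Int.mod (m : Int) k = (m : Int) := by
        rw [PySem.Int.mod_eq_emod_of_pos hk]
        exact Int.emod_eq_of_lt (by positivity) hlt
      rw [hmm]
      simp
    · push_neg at hlt
      have hsplit : m = k.toNat + (m - k.toNat) := by omega
      rw [hsplit, List.replicate_add, List.foldl_append, run_k k c st hinv hk]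
      have hmod : PySem.Int.mod ((k.toNat + (m - k.toNat) : Nat) : Int) k =
          PySem.Int.mod ((m - k.toNat : Nat) : Int) k := by
        rw [PySem.Int.mod_eq_emod_of_pos hk, PySem.Int.mod_eq_emod_of_pos hk]
        have hcast : ((k.toNat + (m - k.toNat) : Nat) : Int) = ((m - k.toNat : Nat) : Int) + k := by
          push_cast; omega
        rw [hcast, Int.add_emod_right]
      rw [hmod]
      exact ih (m - k.toNat) (by omega) st hinv

lemma decomp (c : Char) (rest : List Char) :
    c :: rest = List.replicate ((rest.takeWhile (fun d => d = c)).length + 1) c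
      ++ rest.dropWhile (fun d => d = c) := by
  rw [List.replicate_succ]
  have htw : rest.takeWhile (fun d => d = c) =
      List.replicate (rest.takeWhile (fun d => d = c)).length c := by
    apply List.eq_replicate_of_mem
    intro b hb
    simpa using List.mem_takeWhile_imp hb
  conv_lhs => rw [← List.takeWhile_append_dropWhile (p := fun d => d = c) (l := rest)]
  rw [htw]
  simp

lemma rest_len (c : Char) (rest : List Char) :
    rest.length = (rest.takeWhile (fun d => d = c)).length
      + (rest.dropWhile (fun d => d = c)).length := by
  rw [← List.length_append, List.takeWhile_append_dropWhile]

lemma mod_toNat_le (k : Int) (hk : 0 < k) (m : Nat) :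
    (PySem.Int.mod ((m : Int) + 1) k).toNat ≤ m + 1 := by
  have h1 : 0 ≤ PySem.Int.mod ((m : Int) + 1) k := PySem.Int.mod_nonneg _ hk
  have h2 : PySem.Int.mod ((m : Int) + 1) k < k := PySem.Int.mod_lt _ hk
  by_cases hx : ((m : Int) + 1) < k
  · rw [PySem.Int.mod_eq_emod_of_pos hk]
    have := Int.emod_eq_of_lt (by positivity) hx
    omega
  · omega

lemma head_dropWhile_ne (c : Char) (rest : List Char) :
    ∀ d ∈ (rest.dropWhile (fun d => d = c)).head?, d ≠ c := by
  induction rest with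
  | nil => simp
  | cons a t ih =>
    by_cases h : a = c
    · rw [List.dropWhile_cons_of_pos (by simp [h])]
      exact ih
    · rw [List.dropWhile_cons_of_neg (by simp [h])]
      intro d hd
      simp only [List.head?_cons, Option.mem_def, Option.some.injEq] at hd
      rw [← hd]
      exact h

lemma collapse_len_le (k : Int) (hk : 0 < k) :
    ∀ (n : Nat) (l : List Char), l.length ≤ n → (pvCollapse k l).length ≤ l.length := by
  intro n
  induction n with
  | zero => intro l h; interval_cases h' : l.length <;> simp_all [List.length_eq_zero_iff]; simp [pvCollapse]
  | succ n ih =>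
    intro l h
    cases l with
    | nil => simp [pvCollapse]
    | cons c rest =>
      rw [pvCollapse]
      have hdw := ih (rest.dropWhile (fun d => d = c))
        (le_trans (List.length_dropWhile_le _ _) (by simpa using Nat.le_of_succ_le_succ h))
      have hr := rest_len c rest
      have hm := mod_toNat_le k hk (rest.takeWhile (fun d => d = c)).length
      simp only [List.length_append, List.length_replicate, List.length_cons]
      omega

lemma collapse_len_eq (k : Int) (hk : 0 < k) :
    ∀ (n : Nat) (l : List Char), l.length ≤ n →
      (pvCollapse k l).length = l.length → pvCollapse k l = l := by
  intro n
  induction n with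
  | zero =>
    intro l h _
    have : l = [] := List.length_eq_zero_iff.mp (by omega)
    subst this; simp [pvCollapse]
  | succ n ih =>
    intro l h hlen
    cases l with
    | nil => simp [pvCollapse]
    | cons c rest =>
      rw [pvCollapse] at hlen ⊢
      have hsub : (rest.dropWhile (fun d => d = c)).length ≤ n :=
        le_trans (List.length_dropWhile_le _ _) (by simpa using Nat.le_of_succ_le_succ h)
      have hdle := collapse_len_le k hk n _ hsub
      have hr := rest_len c rest
      have hm := mod_toNat_le k hk (rest.takeWhile (fun d => d = c)).length
      simp only [List.length_append, List.length_replicate, List.length_cons] at hlen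
      have hreq : (PySem.Int.mod ((rest.takeWhile (fun d => d = c)).length + 1) k).toNat
          = (rest.takeWhile (fun d => d = c)).length + 1 := by omega
      have hde : (pvCollapse k (rest.dropWhile (fun d => d = c))).length
          = (rest.dropWhile (fun d => d = c)).length := by omega
      rw [hreq, ih _ hsub hde]
      exact (decomp c rest).symm

lemma collapse_inv (k : Int) (hk : 0 < k) :
    ∀ (n : Nat) (l : List Char) (st : List (Char × Int)), l.length ≤ n → pvInv k st →
      List.foldl (pvStepA k) st (pvCollapse k l) = List.foldl (pvStepA k) st l := by
  intro n
  induction n with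
  | zero =>
    intro l st h _
    have : l = [] := List.length_eq_zero_iff.mp (by omega)
    subst this; simp [pvCollapse]
  | succ n ih =>
    intro l st h hinv
    cases l with
    | nil => simp [pvCollapse]
    | cons c rest =>
      rw [pvCollapse]
      have hsub : (rest.dropWhile (fun d => d = c)).length ≤ n :=
        le_trans (List.length_dropWhile_le _ _) (by simpa using Nat.le_of_succ_le_succ h)
      rw [List.foldl_append]
      rw [ih _ _ hsub (inv_foldl k hk _ st hinv)]
      conv_rhs => rw [decomp c rest]
      rw [List.foldl_append]
      congr 1
      have hcast : ((rest.takeWhile (fun d => d = c)).length : Int) + 1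
          = (((rest.takeWhile (fun d => d = c)).length + 1 : Nat) : Int) := by push_cast; ring
      rw [hcast]
      exact (mod_lemma k c hk ((rest.takeWhile (fun d => d = c)).length + 1) st hinv).symm

lemma fix_id (k : Int) (hk : 0 < k) :
    ∀ (n : Nat) (l : List Char) (st : List (Char × Int)), l.length ≤ n →
      pvCollapse k l = l → pvInv k st → (∀ c ∈ l.head?, pvHeadOk st c) →
      pvRender (List.foldl (pvStepA k) st l) = pvRender st ++ l := by
  intro n
  induction n with
  | zero =>
    intro l st h _ _ _
    have : l = [] := List.length_eq_zero_iff.mp (by omega)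
    subst this; simp
  | succ n ih =>
    intro l st h hfix hinv hok
    cases l with
    | nil => simp
    | cons c rest =>
      rw [pvCollapse] at hfix
      have hsub : (rest.dropWhile (fun d => d = c)).length ≤ n :=
        le_trans (List.length_dropWhile_le _ _) (by simpa using Nat.le_of_succ_le_succ h)
      have hdle := collapse_len_le k hk n _ hsub
      have hr := rest_len c rest
      have hm := mod_toNat_le k hk (rest.takeWhile (fun d => d = c)).length
      have hlen : (List.replicate
            (PySem.Int.mod (((rest.takeWhile (fun d => d = c)).length : Int) + 1) k).toNat c
          ++ pvCollapse k (rest.dropWhile (fun d => d = c))).length = (c :: rest).length := by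
        rw [hfix]
      simp only [List.length_append, List.length_replicate, List.length_cons] at hlen
      have hreq : (PySem.Int.mod (((rest.takeWhile (fun d => d = c)).length : Int) + 1) k).toNat
          = (rest.takeWhile (fun d => d = c)).length + 1 := by omega
      have hde : pvCollapse k (rest.dropWhile (fun d => d = c))
          = rest.dropWhile (fun d => d = c) :=
        collapse_len_eq k hk n _ hsub (by omega)
      have hmlt : (((rest.takeWhile (fun d => d = c)).length : Int) + 1) < k := by
        have h2 : PySem.Int.mod (((rest.takeWhile (fun d => d = c)).length : Int) + 1) k < k :=
          PySem.Int.mod_lt _ hk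
        omega
      conv_lhs => rw [decomp c rest]
      rw [List.foldl_append]
      rw [L_push k c ((rest.takeWhile (fun d => d = c)).length + 1) st (hok c rfl)
        (by omega) (by push_cast; omega)]
      have hinv' : pvInv k ((c, (((rest.takeWhile (fun d => d = c)).length + 1 : Nat) : Int)) :: st) :=
        ⟨by push_cast; omega, by push_cast; omega, hok c rfl, hinv⟩
      rw [ih _ _ hsub hde hinv' ?hok2]
      · rw [render_cons]
        have hc : ((((rest.takeWhile (fun d => d = c)).length + 1 : Nat) : Int)).toNat
            = (rest.takeWhile (fun d => d = c)).length + 1 := by omega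
        rw [hc, List.append_assoc]
        congr 1
        exact (decomp c rest).symm
      case hok2 =>
        intro d hd e he
        simp only [List.head?_cons, Option.mem_def, Option.some.injEq] at he
        rw [← he]
        exact Ne.symm (head_dropWhile_ne c rest d hd)

lemma fixloop_fix (k : Int) (hk : 0 < k) :
    ∀ (fuel : Nat) (l : List Char), l.length < fuel →
      pvCollapse k (pvFixloop k fuel l) = pvFixloop k fuel l := by
  intro fuel
  induction fuel with
  | zero => intro l h; omega
  | succ fuel ih =>
    intro l h
    rw [pvFixloop]
    by_cases hfix : pvCollapse k l = l
    · simp [hfix]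
    · simp [hfix]
      apply ih
      have hle := collapse_len_le k hk l.length l le_rfl
      have hne : (pvCollapse k l).length ≠ l.length :=
        fun he => hfix (collapse_len_eq k hk l.length l le_rfl he)
      omega

lemma fixloop_aval (k : Int) (hk : 0 < k) :
    ∀ (fuel : Nat) (l : List Char),
      pvRender (List.foldl (pvStepA k) [] (pvFixloop k fuel l)) =
        pvRender (List.foldl (pvStepA k) [] l) := by
  intro fuel
  induction fuel with
  | zero => intro l; rfl
  | succ fuel ih =>
    intro l
    rw [pvFixloop]
    by_cases hfix : pvCollapse k l = l
    · simp [hfix]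
    · simp [hfix]
      rw [ih (pvCollapse k l)]
      rw [collapse_inv k hk l.length l [] le_rfl trivial]

-- ===== VERDICT (by name: the statement is the Claim_ definition above) =====
theorem remove_all_adjacent_duplicates_spec : Claim_equal_remove_all_adjacent_duplicates := by
  intro s k _ hpre
  unfold Spec_remove_all_adjacent_duplicates
  unfold remove_all_adjacent_duplicates remove_all_adjacent_duplicates_alt
  have hk : 0 < k := hpre
  set l := s.toList with hl
  set lf := pvFixloop k (l.length + 1) l with hlf
  have hfix : pvCollapse k lf = lf := fixloop_fix k hk (l.length + 1) l (by omega)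
  have h1 : pvRender (List.foldl (pvStepA k) [] l) = pvRender (List.foldl (pvStepA k) [] lf) :=
    (fixloop_aval k hk (l.length + 1) l).symm
  have h2 : pvRender (List.foldl (pvStepA k) [] lf) = lf := by
    have := fix_id k hk lf.length lf [] le_rfl hfix trivial
      (by intro c _ e he; simp at he)
    simpa using this
  show String.mk ((List.foldl (pvStepA k) [] l).reverse.foldl
      (fun res e => res ++ List.replicate e.2.toNat e.1) []) = String.mk lf
  have : (List.foldl (pvStepA k) [] l).reverse.foldl
      (fun res e => res ++ List.replicate e.2.toNat e.1) [] = pvRender (List.foldl (pvStepA k) [] l) := rfl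
  rw [this, h1, h2]
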